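-- pv_equiv track=rewrite | github.com/pypi-data/pypi-mirror-275 | packages/number2text/number2text-0.0.1.tar.gz/number2text-0.0.1/number2text/lang/es.py | convert_less_than_thousand
-- ===== SOURCE A (Python) =====
-- _ones= ["", "uno", "dos", "tres", "cuatro", "cinco", "seis", "siete", "ocho", "nueve"]
--
-- _teens = ["diez", "once", "doce", "trece", "catorce", "quince", "dieciséis", "diecisiete", "dieciocho", "diecinueve"]
--
-- _tens = ["", "", "veinte", "treinta", "cuarenta", "cincuenta", "sesenta", "setenta", "ochenta", "noventa"]
--
-- _hundreds = ["", "ciento", "doscientos", "trescientos", "cuatrocientos", "quinientos", "seiscientos", "setecientos", "ochocientos", "novecientos"]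
--
-- def convert_less_than_thousand(number):
--     if number < 10:
--         return _ones[number]
--     elif number < 20:
--         return _teens[number - 10]
--     elif number < 100:
--         tens, ones = divmod(number, 10)
--         if ones == 0:
--             return _tens[tens]
--         else:
--             return _tens[tens] + " y " + _ones[ones]
--     else:
--         hundreds, less_than_hundred = divmod(number, 100)
--         if less_than_hundred == 0:
--             return _hundreds[hundreds]
--         else:
--             return _hundreds[hundreds] + " " + convert_less_than_thousand(less_than_hundred)
-- ===== SOURCE B (Python) =====
-- _ones= ["", "uno", "dos", "tres", "cuatro", "cinco", "seis", "siete", "ocho", "nueve"]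
--
-- _teens = ["diez", "once", "doce", "trece", "catorce", "quince", "dieciséis", "diecisiete", "dieciocho", "diecinueve"]
--
-- _tens = ["", "", "veinte", "treinta", "cuarenta", "cincuenta", "sesenta", "setenta", "ochenta", "noventa"]
--
-- _hundreds = ["", "ciento", "doscientos", "trescientos", "cuatrocientos", "quinientos", "seiscientos", "setecientos", "ochocientos", "novecientos"]
--
-- def convert_less_than_thousand(number):
--     # Flat digit decomposition: one divmod by 100, then a direct 0-99 rendering.
--     hundreds, rest = divmod(number, 100)
--     if 10 <= rest < 20:
--         small = _teens[rest - 10]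
--     else:
--         tens, ones = divmod(rest, 10)
--         small = _tens[tens] + (" y " if tens >= 2 and ones != 0 else "") + _ones[ones]
--     if hundreds == 0:
--         return small
--     if rest == 0:
--         return _hundreds[hundreds]
--     return _hundreds[hundreds] + " " + small
-- ===== Notes on version B (the rewrite author's own statement) =====
-- stated objective: simpler
-- what changed: Replaced A's guard-chain with a recursive self-call by a flat, non-recursive digit decomposition: one divmod by 100, a direct 0-99 renderer with a conditional ' y ' joiner, then the hundreds word glued on.
-- outside the precondition, e.g. on convert_less_than_thousand(-1): A returns 'nueve', B returns 'novecientos noventa y nueve'; on convert_less_than_thousand(-10): A returns '', B returns 'novecientos noventa'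
import Mathlib
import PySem

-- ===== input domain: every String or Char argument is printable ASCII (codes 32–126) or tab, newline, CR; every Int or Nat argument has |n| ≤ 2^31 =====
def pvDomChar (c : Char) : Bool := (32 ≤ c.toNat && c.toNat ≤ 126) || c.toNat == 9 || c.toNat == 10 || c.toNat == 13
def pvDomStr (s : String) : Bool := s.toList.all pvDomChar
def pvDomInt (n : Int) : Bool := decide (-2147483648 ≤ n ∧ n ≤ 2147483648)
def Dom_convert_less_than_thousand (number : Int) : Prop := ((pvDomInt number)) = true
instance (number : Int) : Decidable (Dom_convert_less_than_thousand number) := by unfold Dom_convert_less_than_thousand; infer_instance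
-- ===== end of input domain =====

-- B replaces A's guard chain + recursive self-call by a single flat divmod-by-100 decomposition (objective: simpler, non-recursive).

-- ===== PORT A =====
def pvOnes : List String := ["", "uno", "dos", "tres", "cuatro", "cinco", "seis", "siete", "ocho", "nueve"]
def pvTeens : List String := ["diez", "once", "doce", "trece", "catorce", "quince", "dieciséis", "diecisiete", "dieciocho", "diecinueve"]
def pvTens : List String := ["", "", "veinte", "treinta", "cuarenta", "cincuenta", "sesenta", "setenta", "ochenta", "noventa"]
def pvHundreds : List String := ["", "ciento", "doscientos", "trescientos", "cuatrocientos", "quinientos", "seiscientos", "setecientos", "ochocientos", "novecientos"]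

-- literal transliteration of A; table lookups via pyGetD (Pre_ keeps indices in range, so the "" default
-- is never used). The Nat fuel is only a structural-termination guard: the one recursive call receives
-- number % 100 < 100, which never recurses again, so fuel 2 always suffices and the fuel-0 arm is dead code.
def pvConvertA (fuel : Nat) (number : Int) : String :=
  match fuel with
  | 0 => ""
  | fuel + 1 =>
    if number < 10 then PySem.List.pyGetD pvOnes number ""
    else if number < 20 then PySem.List.pyGetD pvTeens (number - 10) ""
    else if number < 100 then
      let tens := PySem.Int.floordiv number 10
      let ones := PySem.Int.mod number 10
      if ones = 0 then PySem.List.pyGetD pvTens tens ""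
      else PySem.List.pyGetD pvTens tens "" ++ " y " ++ PySem.List.pyGetD pvOnes ones ""
    else
      let hundreds := PySem.Int.floordiv number 100
      let lth := PySem.Int.mod number 100
      if lth = 0 then PySem.List.pyGetD pvHundreds hundreds ""
      else PySem.List.pyGetD pvHundreds hundreds "" ++ " " ++ pvConvertA fuel lth

def convert_less_than_thousand (number : Int) : String := pvConvertA 2 number

-- ===== PORT B =====
def convert_less_than_thousand_alt (number : Int) : String :=
  let hundreds := PySem.Int.floordiv number 100
  let rest := PySem.Int.mod number 100
  let small :=
    if 10 ≤ rest ∧ rest < 20 then PySem.List.pyGetD pvTeens (rest - 10) ""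
    else
      let tens := PySem.Int.floordiv rest 10
      let ones := PySem.Int.mod rest 10
      PySem.List.pyGetD pvTens tens "" ++ (if 2 ≤ tens ∧ ones ≠ 0 then " y " else "") ++ PySem.List.pyGetD pvOnes ones ""
  if hundreds = 0 then small
  else if rest = 0 then PySem.List.pyGetD pvHundreds hundreds ""
  else PySem.List.pyGetD pvHundreds hundreds "" ++ " " ++ small

-- ===== PRECONDITION & SPEC =====
-- Pre_ excludes number ≥ 1000 (A raises IndexError) and number < 0 (for -11 and below A raises;
-- for -10..-1 A's value is an accidental Python negative-index wraparound into _ones).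
def Pre_convert_less_than_thousand (number : Int) : Prop := 0 ≤ number ∧ number < 1000
instance (number : Int) : Decidable (Pre_convert_less_than_thousand number) := by unfold Pre_convert_less_than_thousand; infer_instance
def pvWitness_convert_less_than_thousand : Int := (125)

def Spec_convert_less_than_thousand (number : Int) (out : String) : Prop := out = convert_less_than_thousand_alt number
instance (number : Int) (out : String) : Decidable (Spec_convert_less_than_thousand number out) := by unfold Spec_convert_less_than_thousand; infer_instance

-- ===== CLAIM (what is proved, stated in full; the proofs are below) =====
def Claim_equal_convert_less_than_thousand : Prop := ∀ (number : Int), Dom_convert_less_than_thousand number → Pre_convert_less_than_thousand number → Spec_convert_less_than_thousand number (convert_less_than_thousand number)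

-- ===== LEMMAS AND PROOFS =====
set_option maxRecDepth 10000 in
theorem pv_agree_lt1000 : ∀ k : Nat, k < 1000 → convert_less_than_thousand (k : Int) = convert_less_than_thousand_alt (k : Int) := by
  decide

-- ===== VERDICT (by name: the statement is the Claim_ definition above) =====
theorem convert_less_than_thousand_spec : Claim_equal_convert_less_than_thousand := by
  intro n _ hpre
  unfold Spec_convert_less_than_thousand
  obtain ⟨h0, h1⟩ := hpre
  lift n to Nat using h0
  exact pv_agree_lt1000 n (by exact_mod_cast h1)
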